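-- pv_equiv track=rewrite | github.com/msantelli/m_peirce | languages/german.py | apply_word_order
-- ===== SOURCE A (Python) =====
-- from typing import Dict, List, Tuple, Optional, Set, Any
--
-- def apply_word_order(components: Dict[str, str]) -> str:
--     """Apply German word order (V2 in main clauses)."""
--     parts = []
--
--     # German has V2 order in main clauses
--     # Verb should be second element
--     if 'time' in components:
--         # Time-Verb-Subject-Object
--         parts.append(components['time'])
--         if 'verb' in components:
--             parts.append(components['verb'])
--         if 'subject' in components:
--             parts.append(components['subject'])
--     else:
--         # Subject-Verb-Object (standard)
--         if 'subject' in components: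
--             parts.append(components['subject'])
--         if 'verb' in components:
--             parts.append(components['verb'])
--
--     if 'object' in components:
--         parts.append(components['object'])
--
--     # Add other components
--     for key, value in components.items():
--         if key not in ['subject', 'verb', 'object', 'time']:
--             parts.append(value)
--
--     return ' '.join(parts)
-- ===== SOURCE B (Python) =====
-- def apply_word_order(components):
--     """Apply German word order (V2 in main clauses)."""
--     if 'time' in components:
--         priority = {'time': 0, 'verb': 1, 'subject': 2, 'object': 3}
--     else:
--         priority = {'subject': 0, 'verb': 1, 'object': 2}
--     ordered = sorted(components.items(), key=lambda kv: priority.get(kv[0], 4))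
--     return ' '.join(value for _, value in ordered)
-- ===== Notes on version B (the rewrite author's own statement) =====
-- stated objective: idiomatic
-- what changed: Replaces A's branch-and-append construction (if-chains per slot plus a trailing loop over the dict) by a rank dict chosen on the presence of 'time' and a single stable sort of components.items() by that rank, joining the sorted values.
import Mathlib
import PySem

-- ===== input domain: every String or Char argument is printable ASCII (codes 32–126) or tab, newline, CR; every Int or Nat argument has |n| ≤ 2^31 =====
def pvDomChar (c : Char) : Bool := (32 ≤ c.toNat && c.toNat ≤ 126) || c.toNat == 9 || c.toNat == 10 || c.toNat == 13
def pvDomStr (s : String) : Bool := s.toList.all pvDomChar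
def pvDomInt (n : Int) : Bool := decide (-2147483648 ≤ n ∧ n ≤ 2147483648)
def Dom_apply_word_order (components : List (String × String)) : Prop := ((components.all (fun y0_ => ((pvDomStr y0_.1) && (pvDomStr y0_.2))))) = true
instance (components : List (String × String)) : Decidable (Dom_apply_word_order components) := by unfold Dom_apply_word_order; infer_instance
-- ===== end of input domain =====

-- B replaces A's branch-and-append construction by a priority map plus one stable sort of the items (alternative decomposition, same cost).

-- ===== PORT A =====
def apply_word_order (components : List (String × String)) : String :=
  let d : PySem.Dict String String := PySem.Dict.mk components
  let parts : List String := []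
  let parts :=
    if d.contains "time" then
      -- Time-Verb-Subject-Object
      let parts := parts ++ [d.getD "time" ""]
      let parts := if d.contains "verb" then parts ++ [d.getD "verb" ""] else parts
      if d.contains "subject" then parts ++ [d.getD "subject" ""] else parts
    else
      -- Subject-Verb-Object (standard)
      let parts := if d.contains "subject" then parts ++ [d.getD "subject" ""] else parts
      if d.contains "verb" then parts ++ [d.getD "verb" ""] else parts
  let parts := if d.contains "object" then parts ++ [d.getD "object" ""] else parts
  let parts := d.items.foldl (fun acc kv =>
    if !(["subject", "verb", "object", "time"].contains kv.1) then acc ++ [kv.2] else acc) parts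
  PySem.Str.join " " parts

-- ===== PORT B =====
def apply_word_order_alt (components : List (String × String)) : String :=
  let d : PySem.Dict String String := PySem.Dict.mk components
  let priority : PySem.Dict String Int :=
    if d.contains "time" then
      PySem.Dict.mk [("time", 0), ("verb", 1), ("subject", 2), ("object", 3)]
    else
      PySem.Dict.mk [("subject", 0), ("verb", 1), ("object", 2)]
  let ordered := PySem.List.sorted d.items (fun kv => priority.getD kv.1 4) false
  PySem.Str.join " " (ordered.map (fun kv => kv.2))

-- ===== PRECONDITION & SPEC =====
-- Pre_ excludes association lists with duplicate keys: the argument is a Python dict, whose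
-- representation as a list of pairs never repeats a key, so such lists are unreachable from Python.
def Pre_apply_word_order (components : List (String × String)) : Prop :=
  (components.map Prod.fst).Nodup
instance (components : List (String × String)) : Decidable (Pre_apply_word_order components) := by unfold Pre_apply_word_order; infer_instance
def pvWitness_apply_word_order : (List (String × String)) :=
  [("subject", "ich"), ("verb", "gehe"), ("object", "heim")]
def Spec_apply_word_order (components : List (String × String)) (out : String) : Prop := out = apply_word_order_alt components
instance (components : List (String × String)) (out : String) : Decidable (Spec_apply_word_order components out) := by unfold Spec_apply_word_order; infer_instance

-- ===== CLAIM (what is proved, stated in full; the proofs are below) =====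
def Claim_equal_apply_word_order : Prop := ∀ (components : List (String × String)), Dom_apply_word_order components → Pre_apply_word_order components → Spec_apply_word_order components (apply_word_order components)

-- ===== LEMMAS AND PROOFS =====

lemma insertBy_append_not_before {α : Type} (before : α → α → Bool) (x : α) (l1 l2 : List α)
    (h : ∀ y ∈ l1, before x y = false) :
    PySem.List.insertBy before x (l1 ++ l2) = l1 ++ PySem.List.insertBy before x l2 := by
  induction l1 with
  | nil => rfl
  | cons a t ih =>
    simp only [List.cons_append, PySem.List.insertBy, h a (by simp)]
    simp [ih (fun y hy => h y (by simp [hy]))]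

lemma insertBy_all_before {α : Type} (before : α → α → Bool) (x : α) (l : List α)
    (h : ∀ y ∈ l, before x y = true) :
    PySem.List.insertBy before x l = x :: l := by
  cases l with
  | nil => rfl
  | cons a t => simp [PySem.List.insertBy, h a (by simp)]

lemma insertBy_mid {α : Type} (before : α → α → Bool) (x : α) (l1 l2 : List α)
    (h1 : ∀ y ∈ l1, before x y = false) (h2 : ∀ y ∈ l2, before x y = true) :
    PySem.List.insertBy before x (l1 ++ l2) = l1 ++ x :: l2 := by
  rw [insertBy_append_not_before _ _ _ _ h1, insertBy_all_before _ _ _ h2]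

lemma sorted_buckets (key : String × String → Int) (xs : List (String × String))
    (h : ∀ a ∈ xs, 0 ≤ key a ∧ key a ≤ 4) :
    PySem.List.sorted xs key false =
      xs.filter (fun a => key a == 0) ++ xs.filter (fun a => key a == 1) ++
      xs.filter (fun a => key a == 2) ++ xs.filter (fun a => key a == 3) ++
      xs.filter (fun a => key a == 4) := by
  rw [PySem.List.sorted_eq_foldl_insertBy]
  induction xs using List.reverseRecOn with
  | nil => rfl
  | append_singleton xs x ih =>
    rw [List.foldl_append, ih (fun a ha => h a (by simp [ha]))]
    simp only [List.foldl_cons, List.foldl_nil, List.filter_append, List.filter_cons, List.filter_nil]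
    have hkmem : ∀ (i : Int) (y : String × String), y ∈ xs.filter (fun a => key a == i) → key y = i := by
      intro i y hy
      have := List.mem_filter.1 hy
      simpa using this.2
    obtain ⟨h0, h4⟩ := h x (by simp)
    have hcase : key x = 0 ∨ key x = 1 ∨ key x = 2 ∨ key x = 3 ∨ key x = 4 := by omega
    rcases hcase with hk | hk | hk | hk | hk
    · rw [show xs.filter (fun a => key a == 0) ++ xs.filter (fun a => key a == 1) ++
          xs.filter (fun a => key a == 2) ++ xs.filter (fun a => key a == 3) ++
          xs.filter (fun a => key a == 4)
        = xs.filter (fun a => key a == 0) ++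
          (xs.filter (fun a => key a == 1) ++ xs.filter (fun a => key a == 2) ++
           xs.filter (fun a => key a == 3) ++ xs.filter (fun a => key a == 4)) from by
            simp [List.append_assoc]]
      rw [insertBy_mid _ _ _ _
        (by intro y hy; simp [hk, hkmem _ _ hy])
        (by intro y hy
            simp only [List.append_assoc, List.mem_append] at hy
            rcases hy with hy | hy | hy | hy <;> simp [hk, hkmem _ _ hy])]
      simp [hk]
    · rw [show xs.filter (fun a => key a == 0) ++ xs.filter (fun a => key a == 1) ++
          xs.filter (fun a => key a == 2) ++ xs.filter (fun a => key a == 3) ++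
          xs.filter (fun a => key a == 4)
        = (xs.filter (fun a => key a == 0) ++ xs.filter (fun a => key a == 1)) ++
          (xs.filter (fun a => key a == 2) ++
           xs.filter (fun a => key a == 3) ++ xs.filter (fun a => key a == 4)) from by
            simp [List.append_assoc]]
      rw [insertBy_mid _ _ _ _
        (by intro y hy
            simp only [List.mem_append] at hy
            rcases hy with hy | hy <;> simp [hk, hkmem _ _ hy])
        (by intro y hy
            simp only [List.append_assoc, List.mem_append] at hy
            rcases hy with hy | hy | hy <;> simp [hk, hkmem _ _ hy])]
      simp [hk]
    · rw [show xs.filter (fun a => key a == 0) ++ xs.filter (fun a => key a == 1) ++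
          xs.filter (fun a => key a == 2) ++ xs.filter (fun a => key a == 3) ++
          xs.filter (fun a => key a == 4)
        = (xs.filter (fun a => key a == 0) ++ xs.filter (fun a => key a == 1) ++
           xs.filter (fun a => key a == 2)) ++
          (xs.filter (fun a => key a == 3) ++ xs.filter (fun a => key a == 4)) from by
            simp [List.append_assoc]]
      rw [insertBy_mid _ _ _ _
        (by intro y hy
            simp only [List.append_assoc, List.mem_append] at hy
            rcases hy with hy | hy | hy <;> simp [hk, hkmem _ _ hy])
        (by intro y hy
            simp only [List.mem_append] at hy
            rcases hy with hy | hy <;> simp [hk, hkmem _ _ hy])]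
      simp [hk]
    · rw [show xs.filter (fun a => key a == 0) ++ xs.filter (fun a => key a == 1) ++
          xs.filter (fun a => key a == 2) ++ xs.filter (fun a => key a == 3) ++
          xs.filter (fun a => key a == 4)
        = (xs.filter (fun a => key a == 0) ++ xs.filter (fun a => key a == 1) ++
           xs.filter (fun a => key a == 2) ++ xs.filter (fun a => key a == 3)) ++
          (xs.filter (fun a => key a == 4)) from rfl]
      rw [insertBy_mid _ _ _ _
        (by intro y hy
            simp only [List.append_assoc, List.mem_append] at hy
            rcases hy with hy | hy | hy | hy <;> simp [hk, hkmem _ _ hy])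
        (by intro y hy; simp [hk, hkmem _ _ hy])]
      simp [hk]
    · rw [PySem.List.insertBy_of_forall_not_before _ _ _
        (by intro y hy
            simp only [List.append_assoc, List.mem_append] at hy
            rcases hy with hy | hy | hy | hy | hy <;> simp [hk, hkmem _ _ hy])]
      simp [hk]

lemma filter_key_of_contains (cs : List (String × String)) (k : String)
    (hnd : (cs.map Prod.fst).Nodup) (hc : (PySem.Dict.mk cs).contains k = true) :
    cs.filter (fun kv => kv.1 == k) = [(k, (PySem.Dict.mk cs).getD k "")] := by
  induction cs with
  | nil => simp [PySem.Dict.contains] at hc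
  | cons a t ih =>
    obtain ⟨a1, a2⟩ := a
    simp only [List.map_cons, List.nodup_cons] at hnd
    by_cases ha : a1 = k
    · subst ha
      have hfilt : t.filter (fun kv => kv.1 == a1) = [] := by
        rw [List.filter_eq_nil_iff]
        intro kv hkv
        simp only [beq_iff_eq]
        intro hkk
        exact hnd.1 (by rw [← hkk]; exact List.mem_map_of_mem hkv)
      have hg : (PySem.Dict.mk ((a1, a2) :: t)).get? a1 = some a2 := by
        rw [PySem.Dict.get?_mk_cons]; simp
      simp [hfilt, PySem.Dict.getD, hg]
    · have hc' : (PySem.Dict.mk t).contains k = true := by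
        simpa [PySem.Dict.contains, ha] using hc
      have hg : (PySem.Dict.mk ((a1, a2) :: t)).get? k = (PySem.Dict.mk t).get? k := by
        rw [PySem.Dict.get?_mk_cons]; simp [ha]
      rw [List.filter_cons_of_neg (by simpa using ha), ih hnd.2 hc']
      simp [PySem.Dict.getD, hg]

lemma filter_key_of_not_contains (cs : List (String × String)) (k : String)
    (hc : (PySem.Dict.mk cs).contains k = false) :
    cs.filter (fun kv => kv.1 == k) = [] := by
  simp only [PySem.Dict.contains, List.any_eq_false] at hc
  rw [List.filter_eq_nil_iff]
  intro kv hkv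
  simpa using hc kv hkv


lemma keyT_eq (s : String) :
    (PySem.Dict.mk [("time", (0:Int)), ("verb", 1), ("subject", 2), ("object", 3)]).getD s 4 =
      if s = "time" then 0 else if s = "verb" then 1 else if s = "subject" then 2
      else if s = "object" then 3 else 4 := by
  by_cases h1 : s = "time" <;> by_cases h2 : s = "verb" <;> by_cases h3 : s = "subject" <;>
    by_cases h4 : s = "object" <;>
    simp_all [PySem.Dict.getD, PySem.Dict.get?, @eq_comm String]

lemma keyS_eq (s : String) :
    (PySem.Dict.mk [("subject", (0:Int)), ("verb", 1), ("object", 2)]).getD s 4 =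
      if s = "subject" then 0 else if s = "verb" then 1 else if s = "object" then 2 else 4 := by
  by_cases h2 : s = "verb" <;> by_cases h3 : s = "subject" <;> by_cases h4 : s = "object" <;>
    simp_all [PySem.Dict.getD, PySem.Dict.get?, @eq_comm String]

theorem apply_word_order_eq_alt (components : List (String × String))
    (hnd : (components.map Prod.fst).Nodup) :
    apply_word_order components = apply_word_order_alt components := by
  unfold apply_word_order apply_word_order_alt
  simp only []
  rw [PySem.List.foldl_append_if]
  by_cases ht : (PySem.Dict.mk components).contains "time"
  · simp only [ht, if_true]
    rw [sorted_buckets _ _ (by intro a _; rw [keyT_eq]; split_ifs <;> omega)]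
    have e0 : components.filter (fun kv =>
        (PySem.Dict.mk [("time",(0:Int)),("verb",1),("subject",2),("object",3)]).getD kv.1 4 == 0)
        = components.filter (fun kv => kv.1 == "time") := by
      refine List.filter_congr fun a _ => ?_
      rw [keyT_eq]
      by_cases h1 : a.1 = "time" <;> by_cases h2 : a.1 = "verb" <;>
        by_cases h3 : a.1 = "subject" <;> by_cases h4 : a.1 = "object" <;> simp_all
    have e1 : components.filter (fun kv =>
        (PySem.Dict.mk [("time",(0:Int)),("verb",1),("subject",2),("object",3)]).getD kv.1 4 == 1)
        = components.filter (fun kv => kv.1 == "verb") := by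
      refine List.filter_congr fun a _ => ?_
      rw [keyT_eq]
      by_cases h1 : a.1 = "time" <;> by_cases h2 : a.1 = "verb" <;>
        by_cases h3 : a.1 = "subject" <;> by_cases h4 : a.1 = "object" <;> simp_all
    have e2 : components.filter (fun kv =>
        (PySem.Dict.mk [("time",(0:Int)),("verb",1),("subject",2),("object",3)]).getD kv.1 4 == 2)
        = components.filter (fun kv => kv.1 == "subject") := by
      refine List.filter_congr fun a _ => ?_
      rw [keyT_eq]
      by_cases h1 : a.1 = "time" <;> by_cases h2 : a.1 = "verb" <;>
        by_cases h3 : a.1 = "subject" <;> by_cases h4 : a.1 = "object" <;> simp_all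
    have e3 : components.filter (fun kv =>
        (PySem.Dict.mk [("time",(0:Int)),("verb",1),("subject",2),("object",3)]).getD kv.1 4 == 3)
        = components.filter (fun kv => kv.1 == "object") := by
      refine List.filter_congr fun a _ => ?_
      rw [keyT_eq]
      by_cases h1 : a.1 = "time" <;> by_cases h2 : a.1 = "verb" <;>
        by_cases h3 : a.1 = "subject" <;> by_cases h4 : a.1 = "object" <;> simp_all
    have e4 : components.filter (fun kv =>
        (PySem.Dict.mk [("time",(0:Int)),("verb",1),("subject",2),("object",3)]).getD kv.1 4 == 4)
        = components.filter (fun kv => !(["subject", "verb", "object", "time"].contains kv.1)) := by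
      refine List.filter_congr fun a _ => ?_
      rw [keyT_eq]
      by_cases h1 : a.1 = "time" <;> by_cases h2 : a.1 = "verb" <;>
        by_cases h3 : a.1 = "subject" <;> by_cases h4 : a.1 = "object" <;> simp_all
    rw [e0, e1, e2, e3, e4, filter_key_of_contains _ _ hnd ht]
    by_cases hv : (PySem.Dict.mk components).contains "verb" <;>
      by_cases hs : (PySem.Dict.mk components).contains "subject" <;>
        by_cases ho : (PySem.Dict.mk components).contains "object" <;>
    simp [hv, hs, ho, filter_key_of_contains _ _ hnd, filter_key_of_not_contains]
  · simp only [ht, Bool.false_eq_true, if_false]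
    rw [sorted_buckets _ _ (by intro a _; rw [keyS_eq]; split_ifs <;> omega)]
    have htmem : ∀ a ∈ components, ¬ a.1 = "time" := by
      intro a ha h1
      have : (PySem.Dict.mk components).contains "time" = true := by
        simp only [PySem.Dict.contains, List.any_eq_true]
        exact ⟨a, ha, by simp [h1]⟩
      simp [this] at ht
    have e0 : components.filter (fun kv =>
        (PySem.Dict.mk [("subject",(0:Int)),("verb",1),("object",2)]).getD kv.1 4 == 0)
        = components.filter (fun kv => kv.1 == "subject") := by
      refine List.filter_congr fun a _ => ?_
      rw [keyS_eq]
      by_cases h2 : a.1 = "verb" <;> by_cases h3 : a.1 = "subject" <;>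
        by_cases h4 : a.1 = "object" <;> simp_all
    have e1 : components.filter (fun kv =>
        (PySem.Dict.mk [("subject",(0:Int)),("verb",1),("object",2)]).getD kv.1 4 == 1)
        = components.filter (fun kv => kv.1 == "verb") := by
      refine List.filter_congr fun a _ => ?_
      rw [keyS_eq]
      by_cases h2 : a.1 = "verb" <;> by_cases h3 : a.1 = "subject" <;>
        by_cases h4 : a.1 = "object" <;> simp_all
    have e2 : components.filter (fun kv =>
        (PySem.Dict.mk [("subject",(0:Int)),("verb",1),("object",2)]).getD kv.1 4 == 2)
        = components.filter (fun kv => kv.1 == "object") := by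
      refine List.filter_congr fun a _ => ?_
      rw [keyS_eq]
      by_cases h2 : a.1 = "verb" <;> by_cases h3 : a.1 = "subject" <;>
        by_cases h4 : a.1 = "object" <;> simp_all
    have e3 : components.filter (fun kv =>
        (PySem.Dict.mk [("subject",(0:Int)),("verb",1),("object",2)]).getD kv.1 4 == 3)
        = [] := by
      rw [List.filter_eq_nil_iff]
      intro a _
      rw [keyS_eq]
      split_ifs <;> simp
    have e4 : components.filter (fun kv =>
        (PySem.Dict.mk [("subject",(0:Int)),("verb",1),("object",2)]).getD kv.1 4 == 4)
        = components.filter (fun kv => !(["subject", "verb", "object", "time"].contains kv.1)) := by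
      refine List.filter_congr fun a ha => ?_
      rw [keyS_eq]
      have h1 := htmem a ha
      by_cases h2 : a.1 = "verb" <;> by_cases h3 : a.1 = "subject" <;>
        by_cases h4 : a.1 = "object" <;> simp_all
    rw [e0, e1, e2, e3, e4]
    by_cases hv : (PySem.Dict.mk components).contains "verb" <;>
      by_cases hs : (PySem.Dict.mk components).contains "subject" <;>
        by_cases ho : (PySem.Dict.mk components).contains "object" <;>
    simp [hv, hs, ho, filter_key_of_contains _ _ hnd, filter_key_of_not_contains]

-- ===== VERDICT (by name: the statement is the Claim_ definition above) =====
theorem apply_word_order_spec : Claim_equal_apply_word_order := by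
  intro components _ hnd
  unfold Spec_apply_word_order
  exact apply_word_order_eq_alt components hnd
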